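-- pv_equiv track=rewrite | github.com/thanhlnbka/self-driving-car | graphic/maps.py | gener_MAP_NAVS
-- ===== SOURCE A (Python) =====
-- def gener_MAP_NAVS(map, number_leng =  4):
--     a = 1
--     dict_insert = dict()
--     for p in range(len(map)-1):
--         dis_x = map[p][0]-map[p+1][0]
--         dis_y = map[p][1]-map[p+1][1]
--         if abs(dis_x) <= 5:
--             max_x = max(map[p][0],map[p+1][0])
--             k_y = abs(dis_y)//number_leng
--             if dis_y >= 0:
--                 arr_insert = [(max_x,map[p][1]-k_y*i) for i in range(1,number_leng)]
--             else:
--                 arr_insert = [(max_x,map[p][1]+k_y*i) for i in range(1,number_leng)]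
--             dict_insert[a] = arr_insert
--             a = a + number_leng
--         elif abs(dis_y) <= 5:
--
--             max_y = max(map[p][1],map[p+1][1])
--             k_x = abs(dis_x)//number_leng
--             if dis_x >= 0:
--                 arr_insert = [(map[p][0]-k_x*i, max_y) for i in range(1,number_leng)]
--             else:
--                 arr_insert = [(map[p][0]+k_x*i, max_y) for i in range(1,number_leng)]
--             dict_insert[a] = arr_insert
--             a = a + number_leng
--
--     for k,v in dict_insert.items():
--         map[k:k] = v
--     return map
-- ===== SOURCE B (Python) =====
-- def gener_MAP_NAVS(map, number_leng=4):
--     # Note: like A, this mutates `map` in place and returns it.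
--     if number_leng <= 1:
--         # range(1, number_leng) is empty, so A inserts nothing.
--         return map
--     segs = []
--     for (x1, y1), (x2, y2) in zip(map, map[1:]):
--         dx = x1 - x2
--         dy = y1 - y2
--         if abs(dx) <= 5:
--             mx = max(x1, x2)
--             k = abs(dy) // number_leng
--             s = 1 if dy >= 0 else -1
--             segs.append([(mx, y1 - s * k * i) for i in range(1, number_leng)])
--         elif abs(dy) <= 5:
--             my = max(y1, y2)
--             k = abs(dx) // number_leng
--             s = 1 if dx >= 0 else -1
--             segs.append([(x1 - s * k * i, my) for i in range(1, number_leng)])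
--     # A's key bookkeeping places the j-th generated segment right after the
--     # j-th element of the original list; build the result in one pass.
--     out = []
--     for i, pt in enumerate(map):
--         out.append(pt)
--         if i < len(segs):
--             out.extend(segs[i])
--     map[:] = out
--     return map
-- ===== Notes on version B (the rewrite author's own statement) =====
-- stated objective: alternative
-- what changed: B drops A's dict of pending insertions and its repeated in-place slice assignments, computing each pair's interpolated segment once and splicing all segments into the result in a single merge pass.
import Mathlib
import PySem

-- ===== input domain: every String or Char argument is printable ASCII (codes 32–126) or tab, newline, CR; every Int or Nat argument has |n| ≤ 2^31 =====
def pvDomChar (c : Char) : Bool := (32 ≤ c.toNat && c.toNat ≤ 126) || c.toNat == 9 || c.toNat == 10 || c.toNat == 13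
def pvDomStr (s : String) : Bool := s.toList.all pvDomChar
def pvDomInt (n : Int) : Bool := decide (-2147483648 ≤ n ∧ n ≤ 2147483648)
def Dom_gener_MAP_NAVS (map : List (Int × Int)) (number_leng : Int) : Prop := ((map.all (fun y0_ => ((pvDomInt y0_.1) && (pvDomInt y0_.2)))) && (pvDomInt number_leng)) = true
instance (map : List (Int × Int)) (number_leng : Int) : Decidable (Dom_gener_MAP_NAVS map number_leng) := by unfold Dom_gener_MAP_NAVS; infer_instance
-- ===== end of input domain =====

-- B replaces A's dict of pending slice-insertions and repeated quadratic
-- slice assignments by one linear merge pass (same return value; like A, the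
-- Python B mutates `map` in place — the equivalence here is about the return value).


-- ===== PORT A =====
-- hand port of Python's empty-slice assignment `xs[k:k] = v` (exact: a negative k
-- is offset by the length, then the index is clamped into [0, len] — PySem.List.clampIdx)
def pvSliceAssign (xs : List (Int × Int)) (k : Int) (v : List (Int × Int)) : List (Int × Int) :=
  let i := PySem.List.clampIdx xs.length k
  xs.take i ++ v ++ xs.drop i

-- the body of A's first `for p in range(len(map)-1)` loop, on the pair (map[p], map[p+1]);
-- state = (a, dict_insert)
def pvStepA (nl : Int) (st : Int × PySem.Dict Int (List (Int × Int)))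
    (q : (Int × Int) × (Int × Int)) : Int × PySem.Dict Int (List (Int × Int)) :=
  let dis_x := q.1.1 - q.2.1
  let dis_y := q.1.2 - q.2.2
  if |dis_x| ≤ 5 then
    let max_x := max q.1.1 q.2.1
    let k_y := PySem.Int.floordiv |dis_y| nl
    let arr := if 0 ≤ dis_y then (PySem.List.pyRange 1 nl 1).map (fun i => (max_x, q.1.2 - k_y * i))
               else (PySem.List.pyRange 1 nl 1).map (fun i => (max_x, q.1.2 + k_y * i))
    (st.1 + nl, st.2.insert st.1 arr)
  else if |dis_y| ≤ 5 then
    let max_y := max q.1.2 q.2.2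
    let k_x := PySem.Int.floordiv |dis_x| nl
    let arr := if 0 ≤ dis_x then (PySem.List.pyRange 1 nl 1).map (fun i => (q.1.1 - k_x * i, max_y))
               else (PySem.List.pyRange 1 nl 1).map (fun i => (q.1.1 + k_x * i, max_y))
    (st.1 + nl, st.2.insert st.1 arr)
  else st

def gener_MAP_NAVS (map : List (Int × Int)) (number_leng : Int) : List (Int × Int) :=
  -- `for p in range(len(map)-1)` with map[p], map[p+1]: indices are always in range,
  -- so getD with an arbitrary default is exact
  let st := (List.range (map.length - 1)).foldl
    (fun st p => pvStepA number_leng st (map.getD p (0, 0), map.getD (p + 1) (0, 0)))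
    (1, PySem.Dict.empty)
  -- `for k,v in dict_insert.items(): map[k:k] = v`
  st.2.items.foldl (fun acc kv => pvSliceAssign acc kv.1 kv.2) map

-- ===== PORT B =====
-- the interpolated segment for one adjacent pair, or none if the pair does not qualify
def pvSeg (nl : Int) (q : (Int × Int) × (Int × Int)) : Option (List (Int × Int)) :=
  let dx := q.1.1 - q.2.1
  let dy := q.1.2 - q.2.2
  if |dx| ≤ 5 then
    let mx := max q.1.1 q.2.1
    let k := PySem.Int.floordiv |dy| nl
    let s : Int := if 0 ≤ dy then 1 else -1
    some ((PySem.List.pyRange 1 nl 1).map (fun i => (mx, q.1.2 - s * k * i)))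
  else if |dy| ≤ 5 then
    let my := max q.1.2 q.2.2
    let k := PySem.Int.floordiv |dx| nl
    let s : Int := if 0 ≤ dx then 1 else -1
    some ((PySem.List.pyRange 1 nl 1).map (fun i => (q.1.1 - s * k * i, my)))
  else none

-- the final merge loop: each element, then its segment (if any left)
def pvMerge : List (Int × Int) → List (List (Int × Int)) → List (Int × Int)
  | xs, [] => xs
  | [], _ :: _ => []
  | pt :: rest, s :: ss => pt :: (s ++ pvMerge rest ss)

def gener_MAP_NAVS_alt (map : List (Int × Int)) (number_leng : Int) : List (Int × Int) :=
  if number_leng ≤ 1 then map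
  else
    let segs := (map.zip map.tail).filterMap (pvSeg number_leng)
    pvMerge map segs

-- ===== PRECONDITION & SPEC =====
-- Pre_ excludes only number_leng = 0 together with a qualifying adjacent pair:
-- there A raises ZeroDivisionError (abs(dis)//number_leng).
def Pre_gener_MAP_NAVS (map : List (Int × Int)) (number_leng : Int) : Prop :=
  number_leng ≠ 0 ∨ ∀ q ∈ map.zip map.tail, ¬(|q.1.1 - q.2.1| ≤ 5 ∨ |q.1.2 - q.2.2| ≤ 5)
instance (map : List (Int × Int)) (number_leng : Int) : Decidable (Pre_gener_MAP_NAVS map number_leng) := by unfold Pre_gener_MAP_NAVS; infer_instance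

def pvWitness_gener_MAP_NAVS : (List (Int × Int)) × Int := ([(0, 0), (0, 12), (3, 12)], 4)

def Spec_gener_MAP_NAVS (map : List (Int × Int)) (number_leng : Int) (out : List (Int × Int)) : Prop := out = gener_MAP_NAVS_alt map number_leng
instance (map : List (Int × Int)) (number_leng : Int) (out : List (Int × Int)) : Decidable (Spec_gener_MAP_NAVS map number_leng out) := by unfold Spec_gener_MAP_NAVS; infer_instance

-- ===== CLAIM (what is proved, stated in full; the proofs are below) =====
def Claim_equal_gener_MAP_NAVS : Prop := ∀ (map : List (Int × Int)) (number_leng : Int), Dom_gener_MAP_NAVS map number_leng → Pre_gener_MAP_NAVS map number_leng → Spec_gener_MAP_NAVS map number_leng (gener_MAP_NAVS map number_leng)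

-- ===== LEMMAS AND PROOFS =====

-- the (key, segment) association list A's first loop builds: keys a, a+nl, a+2*nl, …
def pvKeyed (nl : Int) : Int → List (List (Int × Int)) → List (Int × List (Int × Int))
  | _, [] => []
  | a, s :: ss => (a, s) :: pvKeyed nl (a + nl) ss

-- Step 0: the index loop over range(len-1) visits exactly the adjacent pairs
theorem pv_pairs_eq (map : List (Int × Int)) :
    (List.range (map.length - 1)).map (fun p => (map.getD p (0, 0), map.getD (p + 1) (0, 0)))
      = map.zip map.tail := by
  apply List.ext_getElem
  · simp [List.length_zip]
  · intro i h1 h2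
    simp only [List.length_map, List.length_range] at h1
    simp only [List.getElem_map, List.getElem_range, List.getElem_zip, List.getElem_tail]
    rw [List.getD_eq_getElem _ _ (by omega), List.getD_eq_getElem _ _ (by omega)]

-- A's loop body, expressed through B's per-pair segment function
theorem pvStepA_eq (nl : Int) (st : Int × PySem.Dict Int (List (Int × Int)))
    (q : (Int × Int) × (Int × Int)) :
    pvStepA nl st q = match pvSeg nl q with
      | some s => (st.1 + nl, st.2.insert st.1 s)
      | none => st := by
  unfold pvStepA pvSeg
  by_cases h1 : |q.1.1 - q.2.1| ≤ 5
  · by_cases hdy : 0 ≤ q.1.2 - q.2.2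
    · have h' : q.2.2 ≤ q.1.2 := by omega
      simp [h1, h', one_mul]
    · have h' : ¬ q.2.2 ≤ q.1.2 := by omega
      simp [h1, h', one_mul, neg_mul, sub_neg_eq_add]
  · by_cases h2 : |q.1.2 - q.2.2| ≤ 5
    · by_cases hdx : 0 ≤ q.1.1 - q.2.1
      · have h' : q.2.1 ≤ q.1.1 := by omega
        simp [h1, h2, h', one_mul]
      · have h' : ¬ q.2.1 ≤ q.1.1 := by omega
        simp [h1, h2, h', one_mul, neg_mul, sub_neg_eq_add]
    · simp [h1, h2]

theorem pv_contains_false (d : PySem.Dict Int (List (Int × Int))) (a : Int)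
    (h : ∀ k ∈ d.keys, k < a) : d.contains a = false := by
  by_contra hc
  rw [Bool.not_eq_false, PySem.Dict.contains_iff_mem_keys] at hc
  exact absurd (h a hc) (lt_irrefl a)

-- Step 1: A's first loop appends fresh increasing keys; its items list is pvKeyed of the segments
theorem pv_loop_items (nl : Int) (hnl : 0 < nl) :
    ∀ (ps : List ((Int × Int) × (Int × Int))) (a : Int)
      (d : PySem.Dict Int (List (Int × Int))), (∀ k ∈ d.keys, k < a) →
    ((ps.foldl (pvStepA nl) (a, d)).2).items = d.items ++ pvKeyed nl a (ps.filterMap (pvSeg nl)) := by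
  intro ps
  induction ps with
  | nil => intro a d h; simp [pvKeyed]
  | cons q ps ih =>
    intro a d h
    cases hseg : pvSeg nl q with
    | none => simp only [List.foldl_cons, List.filterMap_cons, pvStepA_eq, hseg]; exact ih a d h
    | some s =>
      have hkeys : ∀ k ∈ (d.insert a s).keys, k < a + nl := by
        intro k hk
        rcases (PySem.Dict.mem_keys_insert d a k s).1 hk with rfl | hk
        · omega
        · have := h k hk; omega
      simp only [List.foldl_cons, List.filterMap_cons, pvStepA_eq, hseg]
      rw [ih _ _ hkeys,
        PySem.Dict.items_insert_of_not_contains _ _ (pv_contains_false d a h)]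
      simp [pvKeyed]

-- Step 2: folding the keyed slice-insertions is B's single merge pass
theorem pv_ins_merge (nl : Int) (hnl : 2 ≤ nl) :
    ∀ (segs : List (List (Int × Int))) (pre xs : List (Int × Int)),
      (∀ s ∈ segs, s.length = (nl - 1).toNat) → segs.length ≤ xs.length →
    (pvKeyed nl ((pre.length : Int) + 1) segs).foldl
        (fun acc kv => pvSliceAssign acc kv.1 kv.2) (pre ++ xs)
      = pre ++ pvMerge xs segs := by
  intro segs
  induction segs with
  | nil => intro pre xs _ _; simp [pvKeyed, pvMerge]
  | cons s ss ih =>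
    intro pre xs hlen hle
    cases xs with
    | nil => simp at hle
    | cons x rest =>
      simp only [pvKeyed, List.foldl_cons]
      have h1 : pvSliceAssign (pre ++ x :: rest) ((pre.length : Int) + 1) s
          = (pre ++ x :: s) ++ rest := by
        unfold pvSliceAssign
        have hc : ((pre.length : Int) + 1) = ((pre.length + 1 : Nat) : Int) := by push_cast; ring
        rw [hc, PySem.List.clampIdx_natCast]
        have hm : min (pre.length + 1) (pre ++ x :: rest).length = pre.length + 1 := by
          simp [List.length_append]
        rw [hm]
        simp only [List.take_append, List.drop_append]
        rw [List.take_of_length_le (by omega), List.drop_eq_nil_of_le (by omega)]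
        simp
      rw [h1]
      have hkey : (pre.length : Int) + 1 + nl = (((pre ++ x :: s).length : Int) + 1) := by
        have hs := hlen s (List.mem_cons_self)
        simp only [List.length_append, List.length_cons]
        push_cast [hs]
        omega
      rw [hkey, ih (pre ++ x :: s) rest (fun t ht => hlen t (List.mem_cons_of_mem _ ht))
        (by simpa using Nat.le_of_succ_le_succ hle)]
      simp [pvMerge]

-- every segment B generates has length (nl-1).toNat; for nl ≤ 1 it is empty
theorem pv_seg_length (nl : Int) (q : (Int × Int) × (Int × Int)) (s : List (Int × Int))
    (h : pvSeg nl q = some s) : s.length = (nl - 1).toNat := by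
  unfold pvSeg at h
  dsimp only at h
  split_ifs at h <;>
    (injection h with h; subst h; simp [PySem.List.length_pyRange_one])

-- degenerate case nl ≤ 1: every stored segment is empty
theorem pv_seg_nil (nl : Int) (hnl : nl ≤ 1) (q : (Int × Int) × (Int × Int))
    (s : List (Int × Int)) (h : pvSeg nl q = some s) : s = [] := by
  have := pv_seg_length nl q s h
  have : s.length = 0 := by omega
  exact List.eq_nil_of_length_eq_zero this

theorem pv_loop_values_nil (nl : Int) (hnl : nl ≤ 1) :
    ∀ (ps : List ((Int × Int) × (Int × Int))) (st : Int × PySem.Dict Int (List (Int × Int))),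
      (∀ v ∈ st.2.values, v = ([] : List (Int × Int))) →
      ∀ v ∈ ((ps.foldl (pvStepA nl) st).2).values, v = ([] : List (Int × Int)) := by
  intro ps
  induction ps with
  | nil => intro st h; exact h
  | cons q ps ih =>
    intro st h
    apply ih
    cases hseg : pvSeg nl q with
    | none => simp only [pvStepA_eq, hseg]; exact h
    | some s =>
      simp only [pvStepA_eq, hseg]
      intro v hv
      rcases PySem.Dict.mem_values_insert _ _ _ _ hv with rfl | hv
      · exact pv_seg_nil nl hnl q v hseg
      · exact h v hv

theorem pv_fold_nil_values (items : List (Int × List (Int × Int))) (acc : List (Int × Int))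
    (h : ∀ kv ∈ items, kv.2 = ([] : List (Int × Int))) :
    items.foldl (fun acc kv => pvSliceAssign acc kv.1 kv.2) acc = acc := by
  induction items generalizing acc with
  | nil => rfl
  | cons kv items ih =>
    have hkv : kv.2 = [] := h kv (List.mem_cons_self)
    simp only [List.foldl_cons]
    rw [show pvSliceAssign acc kv.1 kv.2 = acc from by
      unfold pvSliceAssign; rw [hkv]; simp]
    exact ih acc (fun p hp => h p (List.mem_cons_of_mem _ hp))

-- ===== VERDICT (by name: the statement is the Claim_ definition above) =====
theorem gener_MAP_NAVS_spec : Claim_equal_gener_MAP_NAVS := by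
  intro map nl _ _
  unfold Spec_gener_MAP_NAVS gener_MAP_NAVS gener_MAP_NAVS_alt
  dsimp only
  rw [show (List.range (map.length - 1)).foldl
        (fun st p => pvStepA nl st (map.getD p (0, 0), map.getD (p + 1) (0, 0)))
        (1, PySem.Dict.empty)
      = (map.zip map.tail).foldl (pvStepA nl) (1, PySem.Dict.empty) from by
    rw [← pv_pairs_eq map, List.foldl_map]]
  by_cases hnl : nl ≤ 1
  · rw [if_pos hnl]
    apply pv_fold_nil_values
    intro kv hkv
    exact pv_loop_values_nil nl hnl _ (1, PySem.Dict.empty) (by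
        intro v hv
        rw [show (PySem.Dict.empty : PySem.Dict Int (List (Int × Int))).values = [] from rfl] at hv
        simp at hv)
      kv.2 (List.mem_map_of_mem hkv)
  · rw [if_neg hnl]
    have hnl2 : 2 ≤ nl := by omega
    rw [pv_loop_items nl (by omega) _ 1 PySem.Dict.empty (by
      intro k hk
      rw [show (PySem.Dict.empty : PySem.Dict Int (List (Int × Int))).keys = [] from rfl] at hk
      simp at hk)]
    have hempty : (PySem.Dict.empty : PySem.Dict Int (List (Int × Int))).items = [] := rfl
    rw [hempty, List.nil_append]
    have hm := pv_ins_merge nl hnl2 (List.filterMap (pvSeg nl) (map.zip map.tail)) [] map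
      (fun s hs => by
        obtain ⟨q, _, hq⟩ := List.mem_filterMap.1 hs
        exact pv_seg_length nl q s hq)
      (le_trans (List.length_filterMap_le _ _) (by simp [List.length_zip]))
    simpa using hm
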